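-- pv_equiv track=rewrite | github.com/allanRoberto/revesbot-final | apps/api/services/pattern_score_training_service.py | _normalize_numbers
-- ===== SOURCE A (Python) =====
-- from typing import Any, Callable, Dict, List
--
-- def _normalize_numbers(numbers: Any) -> List[int]:
--     out: List[int] = []
--     seen: set[int] = set()
--     for raw in numbers or []:
--         try:
--             value = int(raw)
--         except (TypeError, ValueError):
--             continue
--         if not (0 <= value <= 36) or value in seen:
--             continue
--         seen.add(value)
--         out.append(value)
--     out.sort()
--     return out
-- ===== SOURCE B (Python) =====
-- from typing import Any, List
--
-- def _normalize_numbers(numbers: Any) -> List[int]: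
--     present = [False] * 37
--     for raw in numbers or []:
--         try:
--             value = int(raw)
--         except (TypeError, ValueError):
--             continue
--         if 0 <= value <= 36:
--             present[value] = True
--     return [i for i in range(37) if present[i]]
-- ===== Notes on version B (the rewrite author's own statement) =====
-- stated objective: alternative
-- what changed: Replaces the seen-set + append list + final sort with a fixed 37-slot boolean presence array filled in one pass and read out by scanning 0..36 in order, so no sort and no dedup set is needed.
import Mathlib
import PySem

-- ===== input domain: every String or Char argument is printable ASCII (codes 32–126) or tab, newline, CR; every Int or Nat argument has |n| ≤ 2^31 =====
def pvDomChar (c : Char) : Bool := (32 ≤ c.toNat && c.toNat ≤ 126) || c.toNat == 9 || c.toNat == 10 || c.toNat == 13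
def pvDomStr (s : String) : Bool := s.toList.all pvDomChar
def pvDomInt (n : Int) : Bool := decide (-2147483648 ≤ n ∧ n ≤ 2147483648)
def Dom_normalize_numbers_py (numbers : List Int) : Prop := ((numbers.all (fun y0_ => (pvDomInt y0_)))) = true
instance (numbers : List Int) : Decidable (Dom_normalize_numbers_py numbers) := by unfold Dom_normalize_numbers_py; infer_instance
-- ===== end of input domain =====

-- B replaces A's seen-set + append + final sort by a fixed 37-slot presence array
-- scanned in ascending order (objective: alternative — the sort disappears; same return value).


-- ===== PORT A =====
-- on List Int arguments, int(raw) is the identity and never raises; `numbers or []` is `numbers`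
def normalize_numbers_py (numbers : List Int) : List Int :=
  let st := numbers.foldl
    (fun (st : List Int × PySem.Set Int) raw =>
      let value := raw
      if ¬ (0 ≤ value ∧ value ≤ 36) ∨ value ∈ st.2 then st
      else (st.1 ++ [value], st.2.add value))
    ([], PySem.Set.empty)
  PySem.List.sorted st.1 (fun x => x)

-- ===== PORT B =====
def normalize_numbers_py_alt (numbers : List Int) : List Int :=
  let present := numbers.foldl
    (fun (present : List Bool) raw =>
      let value := raw
      if 0 ≤ value ∧ value ≤ 36 then present.set value.toNat true else present)
    (List.replicate 37 false)
  (PySem.List.pyRange 0 37).filter (fun i => present.getD i.toNat false)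

-- ===== PRECONDITION & SPEC =====
def Spec_normalize_numbers_py (numbers : List Int) (out : List Int) : Prop := out = normalize_numbers_py_alt numbers
instance (numbers : List Int) (out : List Int) : Decidable (Spec_normalize_numbers_py numbers out) := by unfold Spec_normalize_numbers_py; infer_instance

-- ===== CLAIM (what is proved, stated in full; the proofs are below) =====
def Claim_equal_normalize_numbers_py : Prop := ∀ (numbers : List Int), Dom_normalize_numbers_py numbers → Spec_normalize_numbers_py numbers (normalize_numbers_py numbers)

-- ===== LEMMAS AND PROOFS =====

-- A's loop keeps out = seen as lists
theorem a_fold_diag (l : List Int) (s : PySem.Set Int) :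
    l.foldl (fun (st : List Int × PySem.Set Int) raw =>
      let value := raw
      if ¬ (0 ≤ value ∧ value ≤ 36) ∨ value ∈ st.2 then st
      else (st.1 ++ [value], st.2.add value)) (s, s)
    = (l.foldl (fun s x => if 0 ≤ x ∧ x ≤ 36 then s.add x else s) s,
       l.foldl (fun s x => if 0 ≤ x ∧ x ≤ 36 then s.add x else s) s) := by
  induction l generalizing s with
  | nil => rfl
  | cons x t ih =>
      have hstep : (let value := x
            if ¬ (0 ≤ value ∧ value ≤ 36) ∨ value ∈ (s, s).2 then (s, s)
            else ((s, s).1 ++ [value], (s, s).2.add value))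
          = ((if 0 ≤ x ∧ x ≤ 36 then PySem.Set.add s x else s),
             (if 0 ≤ x ∧ x ≤ 36 then PySem.Set.add s x else s)) := by
        by_cases hv : 0 ≤ x ∧ x ≤ 36 <;> by_cases hm : x ∈ s <;>
          simp [hv, hm, PySem.Set.add, PySem.Set.contains]
      rw [List.foldl_cons, List.foldl_cons, hstep]
      exact ih _

theorem a_out_eq (l : List Int) :
    l.foldl (fun s x => if 0 ≤ x ∧ x ≤ 36 then PySem.Set.add s x else s) PySem.Set.empty
    = PySem.Set.ofList (l.filter (fun x => decide (0 ≤ x ∧ x ≤ 36))) := by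
  rw [PySem.Set.ofList_eq_foldl, ← PySem.List.foldl_ite_eq_foldl_filter]
  rfl

-- B's loop: slot k records membership of ↑k
theorem b_fold_inv (l : List Int) (p : List Bool) (hp : p.length = 37)
    (k : Nat) (hk : k < 37) :
    (l.foldl (fun (present : List Bool) raw =>
        let value := raw
        if 0 ≤ value ∧ value ≤ 36 then present.set value.toNat true else present) p).getD k false
    = (p.getD k false || decide ((k : Int) ∈ l)) := by
  induction l generalizing p with
  | nil => simp
  | cons x t ih =>
      simp only [List.foldl_cons]
      by_cases hv : 0 ≤ x ∧ x ≤ 36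
      · have hlen : (p.set x.toNat true).length = 37 := by simp [hp]
        rw [if_pos hv, ih _ hlen]
        by_cases he : x.toNat = k
        · have hx : x = (k : Int) := by omega
          simp [List.getD, hp, hk, hx]
        · have hx : ¬ ((k : Int) = x) := by omega
          simp [List.getD, he, hx]
      · rw [if_neg hv, ih _ hp]
        have hx : ¬ ((k : Int) = x) := by omega
        simp [hx]

theorem b_char (numbers : List Int) :
    normalize_numbers_py_alt numbers
    = (List.map (fun k : Nat => (k : Int)) (List.range 37)).filter (fun i => decide (i ∈ numbers)) := by
  unfold normalize_numbers_py_alt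
  rw [show (37 : Int) = ((37 : Nat) : Int) from rfl, PySem.List.pyRange_zero_natCast]
  apply List.filter_congr
  intro i hi
  obtain ⟨k, hk, rfl⟩ := List.mem_map.mp hi
  have hk' : k < 37 := List.mem_range.mp hk
  simp only [Int.toNat_natCast]
  rw [b_fold_inv numbers (List.replicate 37 false) (by simp) k hk']
  have hrep : (List.replicate 37 false).getD k false = false := by
    rw [List.getD_eq_getElem?_getD, List.getElem?_replicate]
    split <;> rfl
  rw [hrep, Bool.false_or]

theorem a_char (numbers : List Int) :
    normalize_numbers_py numbers
    = PySem.List.sorted (PySem.Set.ofList (numbers.filter (fun x => decide (0 ≤ x ∧ x ≤ 36)))) (fun x => x) := by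
  unfold normalize_numbers_py
  rw [show (([] : List Int), (PySem.Set.empty : PySem.Set Int))
        = ((PySem.Set.empty : PySem.Set Int), (PySem.Set.empty : PySem.Set Int)) from rfl,
      a_fold_diag numbers PySem.Set.empty, a_out_eq]

-- ===== VERDICT (by name: the statement is the Claim_ definition above) =====
theorem normalize_numbers_py_spec : Claim_equal_normalize_numbers_py := by
  intro numbers _
  show normalize_numbers_py numbers = normalize_numbers_py_alt numbers
  rw [a_char, b_char]
  have hpair : List.Pairwise (fun a b : Int => a < b)
      (List.map (fun k : Nat => (k : Int)) (List.range 37)) := by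
    rw [List.pairwise_map]
    exact List.pairwise_lt_range.imp (fun h => by exact_mod_cast h)
  have hpairR : List.Pairwise (fun a b : Int => a < b)
      ((List.map (fun k : Nat => (k : Int)) (List.range 37)).filter (fun i => decide (i ∈ numbers))) :=
    hpair.filter _
  apply PySem.List.sorted_eq_of_perm_of_pairwise_lt _ _ _ _ hpairR
  rw [List.perm_ext_iff_of_nodup (hpairR.imp ne_of_lt) (PySem.Set.nodup_ofList _)]
  intro a
  rw [PySem.Set.mem_ofList]
  simp only [List.mem_filter, List.mem_map, List.mem_range, decide_eq_true_eq]
  constructor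
  · rintro ⟨⟨k, hk, rfl⟩, hmem⟩
    exact ⟨hmem, by omega, by omega⟩
  · rintro ⟨hmem, h0, h36⟩
    refine ⟨⟨a.toNat, by omega, ?_⟩, hmem⟩
    omega
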